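-- pv_equiv track=rewrite | github.com/antolu/LHCbDIRAC | LHCbDIRAC/DataManagementSystem/scripts/dirac-dms-scan-popularity.py | storageType
-- ===== SOURCE A (Python) =====
-- def storageType( seList ):
--   if not [se for se in seList if not se.endswith( "-ARCHIVE" ) and \
--           se not in ( 'CERN-SW-TEST', 'CERN-FREEZER-EOS', 'CERN-FREEZER' )] and \
--          [se for se in seList if se.endswith( "-ARCHIVE" )]:
--     # Only -ARCHIVE
--     return 'Archived'
--   if [se for se in seList if se.endswith( '-RAW' ) or se.endswith( '-RDST' )]:
--     # Any file on Tape
--     return 'Tape'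
--   # Others
--   return 'Disk'
-- ===== SOURCE B (Python) =====
-- def _rank(se):
--     """Severity rank of one SE: 1 = archive, 0 = neutral freezer/test, 3 = tape, 2 = other disk."""
--     if se.endswith('-ARCHIVE'):
--         return 1
--     if se in ('CERN-SW-TEST', 'CERN-FREEZER-EOS', 'CERN-FREEZER'):
--         return 0
--     if se.endswith('-RAW') or se.endswith('-RDST'):
--         return 3
--     return 2
--
-- def storageType(seList):
--     # Reduce to the maximum per-element rank (a join in the chain 0<1<2<3),
--     # then decode the verdict from a table indexed by that rank.
--     return ('Disk', 'Archived', 'Disk', 'Tape')[max(map(_rank, seList), default=0)]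
-- ===== Notes on version B (the rewrite author's own statement) =====
-- stated objective: alternative
-- what changed: A filters the list three times and tests the filtered lists for emptiness with fixed branch precedence; B maps every element to a numeric severity rank (archive=1, freezer=0, tape=3, other=2), reduces by max, and decodes the verdict from a 4-entry lookup table indexed by that rank.
import Mathlib
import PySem

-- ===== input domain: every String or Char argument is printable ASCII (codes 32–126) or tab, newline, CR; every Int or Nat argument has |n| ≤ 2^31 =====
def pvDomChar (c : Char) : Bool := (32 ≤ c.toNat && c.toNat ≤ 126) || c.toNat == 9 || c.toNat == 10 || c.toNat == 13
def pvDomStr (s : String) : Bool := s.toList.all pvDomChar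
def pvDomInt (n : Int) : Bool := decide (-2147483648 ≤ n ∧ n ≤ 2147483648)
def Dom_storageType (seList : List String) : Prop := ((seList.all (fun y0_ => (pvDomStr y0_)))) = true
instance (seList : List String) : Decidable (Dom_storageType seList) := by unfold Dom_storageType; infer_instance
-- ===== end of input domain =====

-- B replaces A's three filter-and-test-emptiness passes by a map to per-element numeric
-- severity ranks, a max-reduction, and a table lookup (objective: alternative algorithm).

-- ===== PORT A =====
-- A builds the filtered lists and tests their truthiness (non-emptiness), in A's order.
def storageType (seList : List String) : String :=
  if (seList.filter (fun se => !(PySem.Str.endswith se "-ARCHIVE") &&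
        !(se == "CERN-SW-TEST" || se == "CERN-FREEZER-EOS" || se == "CERN-FREEZER"))).isEmpty
     && !(seList.filter (fun se => PySem.Str.endswith se "-ARCHIVE")).isEmpty then
    "Archived"
  else if !(seList.filter (fun se => PySem.Str.endswith se "-RAW" || PySem.Str.endswith se "-RDST")).isEmpty then
    "Tape"
  else
    "Disk"

-- ===== PORT B =====
-- rank of a single storage element, exactly Source B's _rank
def stRank (se : String) : Nat :=
  if PySem.Str.endswith se "-ARCHIVE" then 1
  else if se == "CERN-SW-TEST" || se == "CERN-FREEZER-EOS" || se == "CERN-FREEZER" then 0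
  else if PySem.Str.endswith se "-RAW" || PySem.Str.endswith se "-RDST" then 3
  else 2

-- max(map(_rank, seList), default=0), then the 4-entry verdict table
def storageType_alt (seList : List String) : String :=
  ["Disk", "Archived", "Disk", "Tape"].getD ((seList.map stRank).foldl max 0) "Disk"

-- ===== PRECONDITION & SPEC =====
def Spec_storageType (seList : List String) (out : String) : Prop := out = storageType_alt seList
instance (seList : List String) (out : String) : Decidable (Spec_storageType seList out) := by unfold Spec_storageType; infer_instance

-- ===== CLAIM (what is proved, stated in full; the proofs are below) =====
def Claim_equal_storageType : Prop := ∀ (seList : List String), Dom_storageType seList → Spec_storageType seList (storageType seList)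

-- ===== LEMMAS AND PROOFS =====

-- a string cannot end both in "-ARCHIVE" and in "-RAW"/"-RDST" (last characters differ)
theorem endswith_last {l p : List Char} (h : PySem.Chars.endswith l p = true) (hp : p ≠ []) :
    l.getLast? = p.getLast? := by
  rcases (PySem.Chars.endswith_iff ..).1 h with ⟨t, rfl⟩
  cases hq : p.getLast? with
  | none => exact absurd (List.getLast?_eq_none_iff.1 hq) hp
  | some a => simp [List.getLast?_append, hq]

theorem archive_not_tape {se : String} (h : PySem.Str.endswith se "-ARCHIVE" = true) :
    (PySem.Str.endswith se "-RAW" || PySem.Str.endswith se "-RDST") = false := by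
  simp only [PySem.Str.endswith_eq] at h ⊢
  have h1 := endswith_last (l := se.toList) h (by decide)
  cases hr : PySem.Chars.endswith se.toList "-RAW".toList with
  | false =>
    cases hd : PySem.Chars.endswith se.toList "-RDST".toList with
    | false => rfl
    | true => have := endswith_last (l := se.toList) hd (by decide); simp_all
  | true => have := endswith_last (l := se.toList) hr (by decide); simp_all

theorem freezer_not_tape {se : String}
    (h : (se == "CERN-SW-TEST" || se == "CERN-FREEZER-EOS" || se == "CERN-FREEZER") = true) :
    (PySem.Str.endswith se "-RAW" || PySem.Str.endswith se "-RDST") = false := by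
  have h' : se = "CERN-SW-TEST" ∨ se = "CERN-FREEZER-EOS" ∨ se = "CERN-FREEZER" := by
    simpa [or_assoc] using h
  rcases h' with rfl | rfl | rfl <;> decide

-- pointwise translation of A's predicates into rank equations
theorem rank_archive (se : String) :
    PySem.Str.endswith se "-ARCHIVE" = (stRank se == 1) := by
  unfold stRank; split_ifs <;> simp_all

theorem rank_other (se : String) :
    (!(PySem.Str.endswith se "-ARCHIVE") &&
      !(se == "CERN-SW-TEST" || se == "CERN-FREEZER-EOS" || se == "CERN-FREEZER"))
      = ((stRank se == 2) || (stRank se == 3)) := by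
  unfold stRank; split_ifs <;> (simp_all; try tauto)

theorem rank_tape (se : String) :
    (PySem.Str.endswith se "-RAW" || PySem.Str.endswith se "-RDST") = (stRank se == 3) := by
  unfold stRank
  split_ifs with h1 h2 h3
  · rw [archive_not_tape h1]; decide
  · rw [freezer_not_tape h2]; decide
  · rw [h3]; decide
  · rw [Bool.eq_false_iff.2 h3]; decide

theorem filter_isEmpty_eq (p : String → Bool) (l : List String) :
    (l.filter p).isEmpty = !l.any p := by
  induction l with
  | nil => simp
  | cons x xs ih => by_cases h : p x <;> simp [h, ih]

theorem any_or (l : List String) (p q : String → Bool) :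
    (l.any fun x => p x || q x) = (l.any p || l.any q) := by
  induction l with
  | nil => simp
  | cons x xs ih => cases hp : p x <;> cases hq : q x <;> simp [hp, hq, ih]

-- the max-reduction in terms of which ranks occur
theorem foldl_max_rank (l : List String) : ∀ i : Nat,
    (l.map stRank).foldl max i =
      max i (if l.any (fun se => stRank se == 3) then 3
             else if l.any (fun se => stRank se == 2) then 2
             else if l.any (fun se => stRank se == 1) then 1 else 0) := by
  induction l with
  | nil => simp
  | cons x xs ih =>
    intro i
    simp only [List.map_cons, List.foldl_cons]
    rw [ih]
    have hx : stRank x = 0 ∨ stRank x = 1 ∨ stRank x = 2 ∨ stRank x = 3 := by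
      unfold stRank; split_ifs <;> simp
    have : max (stRank x) (if xs.any (fun se => stRank se == 3) then 3
        else if xs.any (fun se => stRank se == 2) then 2
        else if xs.any (fun se => stRank se == 1) then 1 else 0) =
        (if (x :: xs).any (fun se => stRank se == 3) then 3
        else if (x :: xs).any (fun se => stRank se == 2) then 2
        else if (x :: xs).any (fun se => stRank se == 1) then 1 else 0) := by
      cases hx3 : xs.any (fun se => stRank se == 3) <;>
        cases hx2 : xs.any (fun se => stRank se == 2) <;>
          cases hx1 : xs.any (fun se => stRank se == 1) <;>
            rcases hx with h | h | h | h <;>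
              simp [List.any_cons, h, hx3, hx2, hx1]
    rw [Nat.max_assoc, this]

-- A's three filter predicates, lifted to `any` over the whole list, in rank form
theorem anyA (l : List String) :
    (l.any fun se => PySem.Str.endswith se "-ARCHIVE") = (l.any fun se => stRank se == 1) := by
  simp only [rank_archive]

theorem anyO (l : List String) :
    (l.any fun se => !(PySem.Str.endswith se "-ARCHIVE") &&
        !(se == "CERN-SW-TEST" || se == "CERN-FREEZER-EOS" || se == "CERN-FREEZER"))
      = ((l.any fun se => stRank se == 2) || (l.any fun se => stRank se == 3)) := by
  simp only [rank_other]; exact any_or l _ _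

theorem anyT (l : List String) :
    (l.any fun se => PySem.Str.endswith se "-RAW" || PySem.Str.endswith se "-RDST")
      = (l.any fun se => stRank se == 3) := by
  simp only [rank_tape]

-- ===== VERDICT (by name: the statement is the Claim_ definition above) =====
theorem storageType_spec : Claim_equal_storageType := by
  intro seList _
  show storageType seList = storageType_alt seList
  unfold storageType storageType_alt
  rw [foldl_max_rank, filter_isEmpty_eq, filter_isEmpty_eq, filter_isEmpty_eq,
    anyA, anyO, anyT]
  cases h3 : seList.any (fun se => stRank se == 3) <;>
    cases h2 : seList.any (fun se => stRank se == 2) <;>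
      cases h1 : seList.any (fun se => stRank se == 1) <;>
        simp
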